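-- pv_equiv track=rewrite | github.com/xinyixuu/nanoGPT | data/shakespeare_char_order/convert.py | transform_basic
-- ===== SOURCE A (Python) =====
-- import string
--
-- def transform_basic(text):
--     punctuation = string.punctuation
--     vowels = 'aeiouAEIOU'
--     consonants = ''.join([c for c in string.ascii_letters if c not in vowels])
--
--     transformed = []
--     for char in text:
--         if char in punctuation:
--             transformed.append('1')
--         elif char in vowels:
--             transformed.append('2')
--         elif char in consonants:
--             transformed.append('3')
--         else:
--             transformed.append('_')
--     return ''.join(transformed)
-- ===== SOURCE B (Python) =====
-- import string
--
-- VOWELS = 'aeiouAEIOU'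
--
-- def _build_table():
--     mapping = {}
--     for c in string.punctuation:
--         mapping[c] = '1'
--     for c in VOWELS:
--         mapping[c] = '2'
--     for c in string.ascii_letters:
--         if c not in VOWELS:
--             mapping[c] = '3'
--     return mapping
--
-- _TABLE = _build_table()
--
-- def transform_basic(text):
--     return ''.join(_TABLE.get(c, '_') for c in text)
-- ===== Notes on version B (the rewrite author's own statement) =====
-- stated objective: idiomatic
-- what changed: The per-character if/elif membership cascade over three category strings is replaced by a lookup table built once in three passes, so the main loop is a single dict lookup with a default for unmapped characters.
import Mathlib
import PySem

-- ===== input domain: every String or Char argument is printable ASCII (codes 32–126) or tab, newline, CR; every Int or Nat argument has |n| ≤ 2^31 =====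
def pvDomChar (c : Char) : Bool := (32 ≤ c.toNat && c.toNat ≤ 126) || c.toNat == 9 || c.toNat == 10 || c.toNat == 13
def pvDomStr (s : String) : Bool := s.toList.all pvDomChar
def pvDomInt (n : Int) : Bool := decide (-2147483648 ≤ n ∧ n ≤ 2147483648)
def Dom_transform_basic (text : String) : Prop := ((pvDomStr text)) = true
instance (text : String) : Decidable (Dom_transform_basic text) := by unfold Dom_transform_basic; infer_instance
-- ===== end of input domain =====

-- B replaces A's per-character if/elif membership cascade by a lookup table built
-- once in three passes, so the main loop is a single dict lookup with '_' default (idiomatic).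

-- ===== PORT A =====
-- string.punctuation / string.ascii_letters as literals
def pvPunct : List Char := "!\"#$%&'()*+,-./:;<=>?@[\\]^_`{|}~".toList
def pvVowels : List Char := "aeiouAEIOU".toList
def pvAsciiLetters : List Char := "abcdefghijklmnopqrstuvwxyzABCDEFGHIJKLMNOPQRSTUVWXYZ".toList

def transform_basic (text : String) : String :=
  let consonants := pvAsciiLetters.filter (fun c => !pvVowels.contains c)
  let transformed := text.toList.foldl (fun acc char =>
    if pvPunct.contains char then acc ++ ['1']
    else if pvVowels.contains char then acc ++ ['2']
    else if consonants.contains char then acc ++ ['3']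
    else acc ++ ['_']) []
  String.mk transformed

-- ===== PORT B =====
def pvTable : PySem.Dict Char Char :=
  let m : PySem.Dict Char Char := PySem.Dict.empty
  let m := pvPunct.foldl (fun m c => m.insert c '1') m
  let m := pvVowels.foldl (fun m c => m.insert c '2') m
  pvAsciiLetters.foldl (fun m c => if !pvVowels.contains c then m.insert c '3' else m) m

def transform_basic_alt (text : String) : String :=
  String.mk (text.toList.map (fun c => pvTable.getD c '_'))

-- ===== PRECONDITION & SPEC =====
def Spec_transform_basic (text : String) (out : String) : Prop := out = transform_basic_alt text
instance (text : String) (out : String) : Decidable (Spec_transform_basic text out) := by unfold Spec_transform_basic; infer_instance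

-- ===== CLAIM (what is proved, stated in full; the proofs are below) =====
def Claim_equal_transform_basic : Prop := ∀ (text : String), Dom_transform_basic text → Spec_transform_basic text (transform_basic text)

-- ===== LEMMAS AND PROOFS =====
-- A's branch cascade as a per-character function
def pvClassA (c : Char) : Char :=
  if pvPunct.contains c then '1'
  else if pvVowels.contains c then '2'
  else if (pvAsciiLetters.filter (fun c => !pvVowels.contains c)).contains c then '3'
  else '_'

theorem pvStepA (acc : List Char) (c : Char) :
    (if pvPunct.contains c then acc ++ ['1']
     else if pvVowels.contains c then acc ++ ['2']
     else if (pvAsciiLetters.filter (fun c => !pvVowels.contains c)).contains c then acc ++ ['3']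
     else acc ++ ['_']) = acc ++ [pvClassA c] := by
  unfold pvClassA; split_ifs <;> rfl

theorem pvFoldA (l : List Char) (acc : List Char) :
    l.foldl (fun acc char =>
      if pvPunct.contains char then acc ++ ['1']
      else if pvVowels.contains char then acc ++ ['2']
      else if (pvAsciiLetters.filter (fun c => !pvVowels.contains c)).contains char then acc ++ ['3']
      else acc ++ ['_']) acc = acc ++ l.map pvClassA := by
  induction l generalizing acc with
  | nil => simp
  | cons c l ih =>
    simp only [List.foldl, List.map]
    rw [pvStepA, ih, List.append_assoc]
    rfl

-- pointwise agreement on all ASCII codes (decide over the 128 candidates)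
set_option maxRecDepth 40000 in
theorem pvPointwise : ∀ n ∈ List.range 128, pvClassA (Char.ofNat n) = pvTable.getD (Char.ofNat n) '_' := by
  decide

theorem pvClass_eq (c : Char) (h : pvDomChar c = true) :
    pvClassA c = pvTable.getD c '_' := by
  have hn : c.toNat ∈ List.range 128 := by
    simp only [List.mem_range]
    simp only [pvDomChar, Bool.or_eq_true, Bool.and_eq_true, decide_eq_true_eq, beq_iff_eq] at h
    omega
  have := pvPointwise c.toNat hn
  rwa [Char.ofNat_toNat] at this

-- ===== VERDICT (by name: the statement is the Claim_ definition above) =====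
set_option maxRecDepth 40000 in
theorem transform_basic_spec : Claim_equal_transform_basic := by
  intro text hdom
  unfold Spec_transform_basic transform_basic transform_basic_alt
  simp only [pvFoldA, List.nil_append]
  congr 1
  apply List.map_congr_left
  intro c hc
  apply pvClass_eq
  have : text.toList.all pvDomChar = true := hdom
  exact List.all_eq_true.mp this c hc
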